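-- pv_equiv track=rewrite | github.com/LazyLatte/vortex-raytracing | ci/perfetto.py | parse_kv_brace_aware
-- ===== SOURCE A (Python) =====
-- from typing import Any, Dict, Iterable, Iterator, List, Optional, Tuple
--
-- def split_top_level_commas(s: str) -> List[str]:
--   """
--   Split a string by commas, but ignore commas inside {...} or (...) or [...]
--   (needed for register vectors and payload-like fields).
--   """
--   out: List[str] = []
--   cur: List[str] = []
--   depth_curly = 0
--   depth_paren = 0
--   depth_brack = 0
--   i = 0
--   while i < len(s):
--     c = s[i]
--     if c == "{":
--       depth_curly += 1
--     elif c == "}":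
--       depth_curly = max(0, depth_curly - 1)
--     elif c == "(":
--       depth_paren += 1
--     elif c == ")":
--       depth_paren = max(0, depth_paren - 1)
--     elif c == "[":
--       depth_brack += 1
--     elif c == "]":
--       depth_brack = max(0, depth_brack - 1)
--
--     if c == "," and depth_curly == 0 and depth_paren == 0 and depth_brack == 0:
--       tok = "".join(cur).strip()
--       if tok:
--         out.append(tok)
--       cur = []
--     else:
--       cur.append(c)
--     i += 1
--   tok = "".join(cur).strip()
--   if tok:
--     out.append(tok)
--   return out
--
-- def parse_kv_brace_aware(args_str: str) -> Dict[str, str]: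
--   """
--   Parse "k=v, k2=v2, ..." with comma separation at top level only.
--   Values may contain braces with commas.
--   """
--   out: Dict[str, str] = {}
--   for tok in split_top_level_commas(args_str):
--     if "=" not in tok:
--       continue
--     k, v = tok.split("=", 1)
--     out[k.strip()] = v.strip()
--   return out
-- ===== SOURCE B (Python) =====
-- def parse_kv_brace_aware(args_str: str):
--   """
--   Index-based: repeatedly locate the next top-level comma with a scanning
--   helper, slice that segment out and parse it in place -- no intermediate
--   token list and no per-character buffers.
--   """
--   out = {}
--   n = len(args_str)
--   i = 0
--   while i <= n:
--     j = _next_top_comma(args_str, i)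
--     seg = args_str[i:j].strip()
--     idx = seg.find("=")
--     if idx != -1:
--       out[seg[:idx].strip()] = seg[idx + 1:].strip()
--     i = j + 1
--   return out
--
-- def _next_top_comma(s, i):
--   """Index of the first comma at/after i outside {}/()/[], else len(s)."""
--   dc = dp = db = 0
--   while i < len(s):
--     c = s[i]
--     if c == "{":
--       dc += 1
--     elif c == "}" and dc:
--       dc -= 1
--     elif c == "(":
--       dp += 1
--     elif c == ")" and dp:
--       dp -= 1
--     elif c == "[":
--       db += 1
--     elif c == "]" and db:
--       db -= 1
--     elif c == "," and dc == 0 and dp == 0 and db == 0: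
--       return i
--     i += 1
--   return len(s)
-- ===== Notes on version B (the rewrite author's own statement) =====
-- stated objective: alternative
-- what changed: Replaced A's buffer-accumulating splitter (char-by-char token building into a list, then a second loop re-scanning and re-splitting each token) by index-based scanning: a helper returns the position of the next top-level comma, the segment is sliced out and parsed in place at its first key/value separator, building the dict directly with no token list and no character buffers.
import Mathlib
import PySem

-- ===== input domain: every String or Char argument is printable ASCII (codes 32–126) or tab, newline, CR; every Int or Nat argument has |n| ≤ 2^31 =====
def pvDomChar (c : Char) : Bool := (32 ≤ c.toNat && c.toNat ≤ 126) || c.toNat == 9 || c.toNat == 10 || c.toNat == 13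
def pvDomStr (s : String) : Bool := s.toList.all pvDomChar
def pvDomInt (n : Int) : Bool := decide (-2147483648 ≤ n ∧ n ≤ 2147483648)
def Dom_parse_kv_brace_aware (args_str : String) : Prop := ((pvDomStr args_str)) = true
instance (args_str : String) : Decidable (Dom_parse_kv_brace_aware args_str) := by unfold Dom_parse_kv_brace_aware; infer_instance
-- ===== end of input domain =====

-- B replaces A's two loops (char-buffering splitter producing a token list, then a fold
-- re-splitting each token) by index-based scanning: find the next top-level comma, slice
-- the segment, parse it in place. Alternative decomposition, same O(n) cost.

-- ===== PORT A =====
-- body of A's dict-building loop over one token: `if "=" not in tok: continue` then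
-- `k, v = tok.split("=", 1); out[k.strip()] = v.strip()`
def pvProcA (d : PySem.Dict String String) (tok : List Char) : PySem.Dict String String :=
  if PySem.Chars.isIn ['='] tok then
    match PySem.Chars.splitOnMax tok ['='] 1 with
    | k :: v :: _ =>
        d.insert (String.ofList (PySem.Chars.strip k)) (String.ofList (PySem.Chars.strip v))
    | _ => d          -- unreachable: a split with '=' present yields two pieces
  else d

-- the while-loop of split_top_level_commas, as structural recursion over the chars
def pvStlcGo (s : List Char) (out : List (List Char)) (cur : List Char)
    (dc dp db : Int) : List (List Char) :=
  match s with
  | [] =>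
      let tok := PySem.Chars.strip cur
      if tok = [] then out else out ++ [tok]
  | c :: rest =>
      let st :=
        if c = '{' then (dc + 1, dp, db)
        else if c = '}' then (max 0 (dc - 1), dp, db)
        else if c = '(' then (dc, dp + 1, db)
        else if c = ')' then (dc, max 0 (dp - 1), db)
        else if c = '[' then (dc, dp, db + 1)
        else if c = ']' then (dc, dp, max 0 (db - 1))
        else (dc, dp, db)
      if c = ',' ∧ st.1 = 0 ∧ st.2.1 = 0 ∧ st.2.2 = 0 then
        let tok := PySem.Chars.strip cur
        pvStlcGo rest (if tok = [] then out else out ++ [tok]) [] st.1 st.2.1 st.2.2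
      else
        pvStlcGo rest out (cur ++ [c]) st.1 st.2.1 st.2.2

def split_top_level_commas (s : List Char) : List (List Char) :=
  pvStlcGo s [] [] 0 0 0

def parse_kv_brace_aware (args_str : String) : List (String × String) :=
  ((split_top_level_commas args_str.toList).foldl pvProcA PySem.Dict.empty).items

-- ===== PORT B =====
-- _next_top_comma: offset (within the scanned suffix) of the first comma outside {}/()/[],
-- or the suffix's length if none (Python returns the absolute index; the slices agree)
def pvNextComma (s : List Char) (dc dp db : Int) : Nat :=
  match s with
  | [] => 0
  | c :: rest =>
      if c = '{' then 1 + pvNextComma rest (dc + 1) dp db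
      else if c = '}' ∧ dc ≠ 0 then 1 + pvNextComma rest (dc - 1) dp db
      else if c = '(' then 1 + pvNextComma rest dc (dp + 1) db
      else if c = ')' ∧ dp ≠ 0 then 1 + pvNextComma rest dc (dp - 1) db
      else if c = '[' then 1 + pvNextComma rest dc dp (db + 1)
      else if c = ']' ∧ db ≠ 0 then 1 + pvNextComma rest dc dp (db - 1)
      else if c = ',' ∧ dc = 0 ∧ dp = 0 ∧ db = 0 then 0
      else 1 + pvNextComma rest dc dp db

-- one iteration's body: seg = slice.strip(); idx = seg.find("="); insert if idx != -1
-- (idx ≥ 0 in the then-branch, so seg[:idx] is take idx.toNat and seg[idx+1:] is drop (idx.toNat+1))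
def pvSegStep (d : PySem.Dict String String) (sl : List Char) : PySem.Dict String String :=
  let seg := PySem.Chars.strip sl
  let idx := PySem.Chars.find seg ['=']
  if idx ≠ -1 then
    d.insert (String.ofList (PySem.Chars.strip (seg.take idx.toNat)))
             (String.ofList (PySem.Chars.strip (seg.drop (idx.toNat + 1))))
  else d

-- the `while i <= n` loop of Source B, as recursion on the remaining suffix
def pvParseBGo (s : List Char) (d : PySem.Dict String String) : PySem.Dict String String :=
  let j := pvNextComma s 0 0 0
  let d' := pvSegStep d (s.take j)
  if h : j = s.length then d' else pvParseBGo (s.drop (j + 1)) d'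
termination_by s.length
decreasing_by
  have hs : s ≠ [] := by intro hnil; subst hnil; exact h rfl
  have : 0 < s.length := List.length_pos_of_ne_nil hs
  simp only [List.length_drop]; omega

def parse_kv_brace_aware_alt (args_str : String) : List (String × String) :=
  (pvParseBGo args_str.toList PySem.Dict.empty).items

-- ===== PRECONDITION & SPEC =====
def Spec_parse_kv_brace_aware (args_str : String) (out : List (String × String)) : Prop := out = parse_kv_brace_aware_alt args_str
instance (args_str : String) (out : List (String × String)) : Decidable (Spec_parse_kv_brace_aware args_str out) := by unfold Spec_parse_kv_brace_aware; infer_instance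

-- ===== CLAIM (what is proved, stated in full; the proofs are below) =====
def Claim_equal_parse_kv_brace_aware : Prop := ∀ (args_str : String), Dom_parse_kv_brace_aware args_str → Spec_parse_kv_brace_aware args_str (parse_kv_brace_aware args_str)

-- ===== LEMMAS AND PROOFS =====

-- '=' occurs in a list iff ['='] is an infix of it
theorem pv_infix_singleton {l : List Char} : ['='] <:+: l ↔ '=' ∈ l := by
  constructor
  · intro h; exact h.sublist.mem (List.mem_singleton_self _)
  · intro h
    rcases List.append_of_mem h with ⟨s, t, rfl⟩
    exact ⟨s, t, by simp⟩

theorem pv_isIn_char (tok : List Char) :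
    PySem.Chars.isIn ['='] tok = true ↔ '=' ∈ tok := by
  rw [PySem.Chars.isIn_iff_infix]; exact pv_infix_singleton

-- splitOnMax with maxsplit exhausted returns the remainder as the single last piece
theorem pv_go0 (fuel : Nat) (l : List Char) (acc : List (List Char)) :
    PySem.Chars.splitOnMax.go ['='] fuel 0 l [] acc = (l :: acc).reverse := by
  cases fuel <;> cases l <;> simp [PySem.Chars.splitOnMax.go]

theorem pv_go1 (l : List Char) : ∀ (fuel : Nat) (cur : List Char) (acc : List (List Char)),
    l.length < fuel → '=' ∈ l →
    PySem.Chars.splitOnMax.go ['='] fuel 1 l cur acc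
      = ((List.drop ((List.takeWhile (· ≠ '=') l).length + 1) l)
          :: (cur.reverse ++ List.takeWhile (· ≠ '=') l) :: acc).reverse := by
  induction l with
  | nil => intro fuel cur acc _ hm; simp at hm
  | cons c rest ih =>
      intro fuel cur acc hlen hm
      cases fuel with
      | zero => omega
      | succ f =>
          by_cases hc : c = '='
          · subst hc
            simp [PySem.Chars.splitOnMax.go, List.isPrefixOf, pv_go0]
          · have hm' : '=' ∈ rest := by
              rcases List.mem_cons.mp hm with h | h
              · exact absurd h.symm hc
              · exact h
            have hpre : ['='].isPrefixOf (c :: rest) = false := by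
              simp [List.isPrefixOf]
              exact fun h => hc h.symm
            rw [show PySem.Chars.splitOnMax.go ['='] (f+1) 1 (c :: rest) cur acc
                  = PySem.Chars.splitOnMax.go ['='] f 1 rest (c :: cur) acc by
                simp [PySem.Chars.splitOnMax.go, hpre]]
            rw [ih f (c :: cur) acc (by simpa using Nat.lt_of_succ_lt_succ hlen) hm']
            simp [hc]

theorem pv_splitMax_char {tok : List Char} (h : '=' ∈ tok) :
    PySem.Chars.splitOnMax tok ['='] 1
      = [List.takeWhile (· ≠ '=') tok,
         List.drop ((List.takeWhile (· ≠ '=') tok).length + 1) tok] := by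
  unfold PySem.Chars.splitOnMax
  rw [if_neg (by norm_num)]
  rw [show Int.toNat 1 = 1 from rfl]
  rw [pv_go1 tok (tok.length + 1) [] [] (Nat.lt_succ_self _) h]
  simp

-- the element right after the takeWhile prefix fails the predicate
theorem pv_getElem_takeWhile_length (p : Char → Bool) (l : List Char)
    (h : (l.takeWhile p).length < l.length) :
    ¬ p (l[(l.takeWhile p).length]'h) := by
  induction l with
  | nil => simp at h
  | cons c cs ih =>
      by_cases hc : p c
      · have := ih (by simpa [List.takeWhile_cons, hc] using h)
        simpa [List.takeWhile_cons, hc] using this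
      · simp [hc]

-- seg.find("=") is the length of the no-'='-prefix, when '=' occurs
theorem pv_find_mem {seg : List Char} (h : '=' ∈ seg) :
    PySem.Chars.find seg ['='] = (((seg.takeWhile (· ≠ '=')).length : Nat) : Int) := by
  have hinf : ['='] <:+: seg := pv_infix_singleton.mpr h
  have hnn : 0 ≤ PySem.Chars.find seg ['='] := (PySem.Chars.find_nonneg_iff _ _).mpr hinf
  obtain ⟨hpre, hmin⟩ := PySem.Chars.find_spec (s := seg) (sub := ['=']) hnn
  set f := (PySem.Chars.find seg ['=']).toNat with hf
  set k := (seg.takeWhile (· ≠ '=')).length with hk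
  have hkle : k ≤ seg.length := (List.takeWhile_sublist _).length_le
  have hklt : k < seg.length := by
    rcases lt_or_eq_of_le hkle with h1 | h1
    · exact h1
    · exfalso
      have heq : seg.takeWhile (· ≠ '=') = seg :=
        List.IsPrefix.eq_of_length (List.takeWhile_prefix _) h1
      have h2 := List.mem_takeWhile_imp (l := seg) (p := (· ≠ '=')) (heq ▸ h)
      simp at h2
  have hchk : seg[k]'hklt = '=' := by
    have h2 := pv_getElem_takeWhile_length (fun x => decide (x ≠ '=')) seg hklt
    simp only [decide_eq_true_eq, not_not] at h2
    exact h2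
  have hiff : ∀ (i : Nat) (hi : i < seg.length),
      (['='] <+: seg.drop i) ↔ seg[i]'hi = '=' := by
    intro i hi
    rw [List.drop_eq_getElem_cons hi]
    constructor
    · intro hp
      exact (List.cons_prefix_cons.mp hp).1.symm
    · intro he; rw [he]; exact List.cons_prefix_cons.mpr ⟨rfl, List.nil_prefix⟩
  have hflt : f < seg.length := by
    by_contra hge
    have hnil : seg.drop f = [] := List.drop_eq_nil_of_le (by omega)
    rw [hnil] at hpre
    simp at hpre
  have hbefore : ∀ (i : Nat) (hik : i < k), seg[i]'(lt_trans hik hklt) ≠ '=' := by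
    intro i hik
    have htk : seg.takeWhile (· ≠ '=') = seg.take k :=
      List.prefix_iff_eq_take.mp (List.takeWhile_prefix _)
    have hlen : i < (seg.take k).length := by
      rw [List.length_take]; omega
    have hmem : (seg.take k)[i]'hlen ∈ seg.takeWhile (· ≠ '=') := by
      rw [htk]; exact List.getElem_mem _
    have hp := List.mem_takeWhile_imp hmem
    have hgt : (seg.take k)[i]'hlen = seg[i]'(lt_trans hik hklt) := by
      simp
    rw [hgt] at hp
    simpa using hp
  have hfk : f = k := by
    rcases Nat.lt_trichotomy f k with h1 | h1 | h1
    · exact absurd ((hiff f hflt).mp hpre) (hbefore f h1)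
    · exact h1
    · exact absurd ((hiff k hklt).mpr hchk) (hmin k h1)
  have hcast : ((PySem.Chars.find seg ['=']).toNat : Int) = PySem.Chars.find seg ['='] :=
    Int.toNat_of_nonneg hnn
  rw [← hcast, ← hf, hfk]

-- B's segment body = A's per-token body applied to the stripped slice
theorem pv_seg_eq (d : PySem.Dict String String) (t : List Char) :
    (if PySem.Chars.strip t = [] then d else pvProcA d (PySem.Chars.strip t))
      = pvSegStep d t := by
  unfold pvSegStep
  set seg := PySem.Chars.strip t with hseg
  by_cases h0 : seg = []
  · rw [if_pos h0, h0]
    have : PySem.Chars.find ([] : List Char) ['='] = -1 := by decide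
    simp [this]
  · rw [if_neg h0]
    by_cases hm : '=' ∈ seg
    · have hfind := pv_find_mem hm
      set k := (seg.takeWhile (· ≠ '=')).length with hk
      have hne : PySem.Chars.find seg ['='] ≠ -1 := by rw [hfind]; omega
      rw [if_pos hne, hfind]
      unfold pvProcA
      rw [if_pos ((pv_isIn_char _).mpr hm)]
      rw [pv_splitMax_char hm]
      have htk : seg.take ((k : Int).toNat) = seg.takeWhile (· ≠ '=') := by
        rw [Int.toNat_natCast]
        exact (List.prefix_iff_eq_take.mp (List.takeWhile_prefix _)).symm
      rw [show ((k : Int).toNat + 1) = k + 1 by rw [Int.toNat_natCast], htk]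
    · have hne : PySem.Chars.find seg ['='] = -1 :=
        (PySem.Chars.find_eq_neg_one_iff _ _).mpr (fun h => hm (pv_infix_singleton.mp h))
      rw [if_neg (by simp [hne])]
      unfold pvProcA
      rw [if_neg (by intro h; exact hm ((pv_isIn_char _).mp h))]

-- folding A's step over one flushed token = B's segment body
theorem pv_fold_flush (d : PySem.Dict String String) (out : List (List Char)) (t : List Char) :
    List.foldl pvProcA d (if PySem.Chars.strip t = [] then out else out ++ [PySem.Chars.strip t])
      = pvSegStep (List.foldl pvProcA d out) t := by
  rw [← pv_seg_eq]
  by_cases h0 : PySem.Chars.strip t = []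
  · rw [if_pos h0, if_pos h0]
  · rw [if_neg h0, if_neg h0, List.foldl_append]; rfl

-- the right-hand shape of the segmentwise re-expression of A's splitter loop (proof-only)
def pvRHS (s : List Char) (out : List (List Char)) (cur : List Char)
    (dc dp db : Int) : List (List Char) :=
  if pvNextComma s dc dp db = s.length then
    (if PySem.Chars.strip (cur ++ s) = [] then out
     else out ++ [PySem.Chars.strip (cur ++ s)])
  else pvStlcGo (s.drop (pvNextComma s dc dp db + 1))
        (if PySem.Chars.strip (cur ++ s.take (pvNextComma s dc dp db)) = [] then out
         else out ++ [PySem.Chars.strip (cur ++ s.take (pvNextComma s dc dp db))])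
        [] 0 0 0

-- one non-comma step of both loops at once
theorem pv_step_case (c : Char) (rest : List Char) (out : List (List Char)) (cur : List Char)
    (dcX dpX dbX dc' dp' db' : Int) (h0c : 0 ≤ dc') (h0p : 0 ≤ dp') (h0b : 0 ≤ db')
    (IH : ∀ (out : List (List Char)) (cur : List Char) (dc dp db : Int),
        0 ≤ dc → 0 ≤ dp → 0 ≤ db →
        pvStlcGo rest out cur dc dp db = pvRHS rest out cur dc dp db)
    (hB : pvNextComma (c :: rest) dcX dpX dbX = 1 + pvNextComma rest dc' dp' db') :
    pvStlcGo rest out (cur ++ [c]) dc' dp' db' = pvRHS (c :: rest) out cur dcX dpX dbX := by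
  rw [IH out (cur ++ [c]) dc' dp' db' h0c h0p h0b]
  unfold pvRHS
  rw [hB, Nat.add_comm 1 (pvNextComma rest dc' dp' db')]
  simp only [List.length_cons, List.drop_succ_cons, List.take_succ_cons,
    List.append_assoc, List.singleton_append, Nat.add_right_cancel_iff]

-- A's splitter loop, re-expressed segmentwise through B's comma finder
theorem pv_stlc_eq (s : List Char) : ∀ (out : List (List Char)) (cur : List Char)
    (dc dp db : Int), 0 ≤ dc → 0 ≤ dp → 0 ≤ db →
    pvStlcGo s out cur dc dp db = pvRHS s out cur dc dp db := by
  induction s with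
  | nil =>
      intro out cur dc dp db _ _ _
      simp [pvStlcGo, pvRHS, pvNextComma]
  | cons c rest ih =>
      intro out cur dc dp db h0c h0p h0b
      by_cases h1 : c = '{'
      · subst h1
        rw [show pvStlcGo ('{' :: rest) out cur dc dp db
              = pvStlcGo rest out (cur ++ ['{']) (dc + 1) dp db by simp [pvStlcGo]]
        exact pv_step_case _ _ _ _ _ _ _ _ _ _ (by omega) h0p h0b ih (by simp [pvNextComma])
      by_cases h2 : c = '}'
      · subst h2
        by_cases hz : dc = 0
        · subst hz
          rw [show pvStlcGo ('}' :: rest) out cur 0 dp db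
                = pvStlcGo rest out (cur ++ ['}']) 0 dp db by simp [pvStlcGo]]
          exact pv_step_case _ _ _ _ _ _ _ _ _ _ le_rfl h0p h0b ih (by simp [pvNextComma])
        · have hm : max 0 (dc - 1) = dc - 1 := by omega
          rw [show pvStlcGo ('}' :: rest) out cur dc dp db
                = pvStlcGo rest out (cur ++ ['}']) (dc - 1) dp db by simp [pvStlcGo, hm]]
          exact pv_step_case _ _ _ _ _ _ _ _ _ _ (by omega) h0p h0b ih
            (by simp [pvNextComma, hz])
      by_cases h3 : c = '('
      · subst h3
        rw [show pvStlcGo ('(' :: rest) out cur dc dp db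
              = pvStlcGo rest out (cur ++ ['(']) dc (dp + 1) db by simp [pvStlcGo]]
        exact pv_step_case _ _ _ _ _ _ _ _ _ _ h0c (by omega) h0b ih (by simp [pvNextComma])
      by_cases h4 : c = ')'
      · subst h4
        by_cases hz : dp = 0
        · subst hz
          rw [show pvStlcGo (')' :: rest) out cur dc 0 db
                = pvStlcGo rest out (cur ++ [')']) dc 0 db by simp [pvStlcGo]]
          exact pv_step_case _ _ _ _ _ _ _ _ _ _ h0c le_rfl h0b ih (by simp [pvNextComma])
        · have hm : max 0 (dp - 1) = dp - 1 := by omega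
          rw [show pvStlcGo (')' :: rest) out cur dc dp db
                = pvStlcGo rest out (cur ++ [')']) dc (dp - 1) db by simp [pvStlcGo, hm]]
          exact pv_step_case _ _ _ _ _ _ _ _ _ _ h0c (by omega) h0b ih
            (by simp [pvNextComma, hz])
      by_cases h5 : c = '['
      · subst h5
        rw [show pvStlcGo ('[' :: rest) out cur dc dp db
              = pvStlcGo rest out (cur ++ ['[']) dc dp (db + 1) by simp [pvStlcGo]]
        exact pv_step_case _ _ _ _ _ _ _ _ _ _ h0c h0p (by omega) ih (by simp [pvNextComma])
      by_cases h6 : c = ']'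
      · subst h6
        by_cases hz : db = 0
        · subst hz
          rw [show pvStlcGo (']' :: rest) out cur dc dp 0
                = pvStlcGo rest out (cur ++ [']']) dc dp 0 by simp [pvStlcGo]]
          exact pv_step_case _ _ _ _ _ _ _ _ _ _ h0c h0p le_rfl ih (by simp [pvNextComma])
        · have hm : max 0 (db - 1) = db - 1 := by omega
          rw [show pvStlcGo (']' :: rest) out cur dc dp db
                = pvStlcGo rest out (cur ++ [']']) dc dp (db - 1) by simp [pvStlcGo, hm]]
          exact pv_step_case _ _ _ _ _ _ _ _ _ _ h0c h0p (by omega) ih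
            (by simp [pvNextComma, hz])
      by_cases h7 : c = ','
      · subst h7
        by_cases hz : dc = 0 ∧ dp = 0 ∧ db = 0
        · obtain ⟨hzc, hzp, hzb⟩ := hz
          subst hzc; subst hzp; subst hzb
          rw [show pvStlcGo (',' :: rest) out cur 0 0 0
                = pvStlcGo rest
                    (if PySem.Chars.strip cur = [] then out
                     else out ++ [PySem.Chars.strip cur]) [] 0 0 0 by simp [pvStlcGo]]
          unfold pvRHS
          rw [show pvNextComma (',' :: rest) 0 0 0 = 0 by simp [pvNextComma]]
          rw [if_neg (show ¬ ((0 : Nat) = (',' :: rest).length) by simp)]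
          simp only [List.take_zero, List.append_nil, Nat.zero_add, List.drop_succ_cons,
            List.drop_zero]
        · rw [show pvStlcGo (',' :: rest) out cur dc dp db
                = pvStlcGo rest out (cur ++ [',']) dc dp db by
              simp only [pvStlcGo]
              rw [if_neg (by simp; omega), if_neg (by decide), if_neg (by decide),
                if_neg (by decide), if_neg (by decide), if_neg (by decide), if_neg (by decide)]]
          exact pv_step_case _ _ _ _ _ _ _ _ _ _ h0c h0p h0b ih
            (by
              simp only [pvNextComma]
              rw [if_neg (by decide), if_neg (by simp), if_neg (by decide), if_neg (by simp),
                if_neg (by decide), if_neg (by simp), if_neg (by simp; omega)])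
      · rw [show pvStlcGo (c :: rest) out cur dc dp db
              = pvStlcGo rest out (cur ++ [c]) dc dp db by
            simp [pvStlcGo, h1, h2, h3, h4, h5, h6, h7]]
        exact pv_step_case _ _ _ _ _ _ _ _ _ _ h0c h0p h0b ih
          (by simp [pvNextComma, h1, h2, h3, h4, h5, h6, h7])

-- the whole pipeline, segmentwise
theorem pv_fold (n : Nat) : ∀ (s : List Char), s.length ≤ n →
    ∀ (d : PySem.Dict String String) (out : List (List Char)),
    List.foldl pvProcA d (pvStlcGo s out [] 0 0 0)
      = pvParseBGo s (List.foldl pvProcA d out) := by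
  induction n with
  | zero =>
      intro s hlen d out
      have hnil : s = [] := List.eq_nil_of_length_eq_zero (Nat.le_zero.mp hlen)
      subst hnil
      rw [pvParseBGo]
      rw [show pvStlcGo [] out [] 0 0 0 = out by
        simp [pvStlcGo, PySem.Chars.strip, PySem.Chars.lstrip, PySem.Chars.rstrip]]
      rfl
  | succ n ih =>
      intro s hlen d out
      rw [pv_stlc_eq s out [] 0 0 0 le_rfl le_rfl le_rfl]
      unfold pvRHS
      rw [List.nil_append, List.nil_append]
      conv_rhs => rw [pvParseBGo]
      by_cases hend : pvNextComma s 0 0 0 = s.length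
      · rw [if_pos hend, dif_pos hend, pv_fold_flush, hend, List.take_length]
      · rw [if_neg hend, dif_neg hend]
        have hne : s ≠ [] := by
          intro hnil; subst hnil; exact hend rfl
        have hlt : (s.drop (pvNextComma s 0 0 0 + 1)).length ≤ n := by
          have hpos : 0 < s.length := List.length_pos_of_ne_nil hne
          simp only [List.length_drop]
          omega
        rw [ih _ hlt d _, pv_fold_flush]

-- ===== VERDICT (by name: the statement is the Claim_ definition above) =====
theorem parse_kv_brace_aware_spec : Claim_equal_parse_kv_brace_aware := by
  intro args_str _
  unfold Spec_parse_kv_brace_aware parse_kv_brace_aware parse_kv_brace_aware_alt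
    split_top_level_commas
  have h1 := pv_fold args_str.toList.length args_str.toList le_rfl PySem.Dict.empty []
  simp only [List.foldl_nil] at h1
  rw [h1]
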